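-- pv_equiv track=rewrite | github.com/joshdlowell/sync_project | integrity_check/merkle_tree_service.py | _remove_redundant_paths
-- ===== SOURCE A (Python) =====
-- def _remove_redundant_paths(items: list, min_depth: int = 1) -> list:
--     """
--     Returns a list of path strings containing only the deepest common parents
--     that are at deeper than given min_depth.
--
--     Args:
--         items: List of path strings
--         min_depth: Depth of the shallowest path consolidation (default 1)
--
--     Returns:
--         List of non-redundant path strings
--     """
--     if not items:
--         return []
--
--     # Filter paths to ensure they're at least min_depth deep
--     filtered_items = []
--
--     for path in items:
--         # Count depth by number of separators (assuming '/' as separator)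
--         depth = path.count('/') if path.startswith('/') else path.count('/') + 1
--         if depth >= min_depth:
--             filtered_items.append(path)
--
--     if not filtered_items:
--         return []
--
--     # Remove redundant paths - keep only the deepest common parents
--     result = []
--
--     for current in filtered_items:
--         should_add = True
--         items_to_remove = []
--
--         for i, existing in enumerate(result):
--             if current.startswith(existing + '/') or current == existing:
--                 # Current is child of existing or same - don't add current
--                 should_add = False
--                 break
--             elif existing.startswith(current + '/'):
--                 # Existing is child of current - mark existing for removal
--                 items_to_remove.append(i)
--
--         if should_add:
--             # Remove children that are deeper than current
--             for i in reversed(items_to_remove):  # Remove in reverse order to maintain indices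
--                 result.pop(i)
--             result.append(current)
--
--     return result
-- ===== SOURCE B (Python) =====
-- def _has_live_ancestor(path, present):
--     prefix = ""
--     for ch in path:
--         if ch == '/' and prefix in present:
--             return True
--         prefix += ch
--     return False
--
--
-- def _remove_redundant_paths(items: list, min_depth: int = 1) -> list:
--     filtered = [p for p in items
--                 if p.count('/') + (0 if p.startswith('/') else 1) >= min_depth]
--     present = set(filtered)
--     result = []
--     seen = set()
--     for path in filtered:
--         if path in seen:
--             continue
--         seen.add(path)
--         if not _has_live_ancestor(path, present):
--             result.append(path)
--     return result
-- ===== Notes on version B (the rewrite author's own statement) =====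
-- stated objective: alternative
-- what changed: Replaced A's rescans of the running result list (break/collect-indices/pop bookkeeping) by a single pass that checks each path's proper prefix-ancestors for membership in a set of all depth-filtered paths, with a seen-set for duplicates, preserving first-occurrence order.
import Mathlib
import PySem

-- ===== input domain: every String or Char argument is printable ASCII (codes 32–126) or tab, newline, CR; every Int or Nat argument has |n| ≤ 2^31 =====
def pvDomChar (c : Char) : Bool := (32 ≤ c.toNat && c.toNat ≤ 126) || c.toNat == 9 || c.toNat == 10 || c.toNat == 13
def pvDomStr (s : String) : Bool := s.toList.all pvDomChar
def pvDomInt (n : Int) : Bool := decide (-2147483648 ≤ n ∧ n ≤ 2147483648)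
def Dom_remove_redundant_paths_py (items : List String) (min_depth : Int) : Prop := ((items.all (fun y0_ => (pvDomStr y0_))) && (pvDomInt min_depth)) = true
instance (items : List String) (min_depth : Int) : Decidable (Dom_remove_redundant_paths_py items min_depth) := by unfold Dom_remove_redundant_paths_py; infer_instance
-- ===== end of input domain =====

-- B replaces A's rescans of the running result list by a single pass that tests each
-- path's proper prefix-ancestors against a set of all depth-filtered paths (objective: alternative).

-- ===== PORT A =====
-- depth = path.count('/') if path.startswith('/') else path.count('/') + 1
def pvDepthA (path : String) : Int :=
  if PySem.Str.startswith path "/" then (PySem.Str.count path "/" : Int)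
  else (PySem.Str.count path "/" : Int) + 1

-- the inner "for i, existing in enumerate(result)" scan with break;
-- returns (should_add, items_to_remove); i is the running enumerate index
def pvScanA (current : String) : List String → Int → Bool × List Int
  | [], _ => (true, [])
  | existing :: rest, i =>
    if PySem.Str.startswith current (existing ++ "/") || current == existing then (false, [])
    else if PySem.Str.startswith existing (current ++ "/") then
      let p := pvScanA current rest (i + 1)
      (p.1, i :: p.2)
    else pvScanA current rest (i + 1)

-- "for i in reversed(items_to_remove): result.pop(i)"; the none branch is unreachable
-- (the scan only produces in-range indices) and merely makes the computation total
def pvPopAll (result : List String) (idxs : List Int) : List String :=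
  idxs.foldl (fun acc i =>
    match PySem.List.pop? acc i with
    | some q => q.2
    | none => acc) result

-- one iteration of the outer "for current in filtered_items" loop
def pvStepA (result : List String) (current : String) : List String :=
  if (pvScanA current result 0).1
  then pvPopAll result ((pvScanA current result 0).2).reverse ++ [current]
  else result

def remove_redundant_paths_py (items : List String) (min_depth : Int) : List String :=
  if items == [] then []
  else
    let filtered_items := items.foldl
      (fun acc path => if pvDepthA path ≥ min_depth then acc ++ [path] else acc) []
    if filtered_items == [] then []
    else filtered_items.foldl pvStepA []

-- ===== PORT B =====
-- _has_live_ancestor: walk the path, growing the prefix; true on the first '/' whose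
-- preceding prefix is in `present`
def pvHLA (present : PySem.Set String) : List Char → List Char → Bool
  | _, [] => false
  | pre, c :: rest =>
    if c == '/' && PySem.Set.contains present (String.ofList pre) then true
    else pvHLA present (pre ++ [c]) rest

def remove_redundant_paths_py_alt (items : List String) (min_depth : Int) : List String :=
  let filtered := items.filter (fun p =>
    decide ((PySem.Str.count p "/" : Int) + (if PySem.Str.startswith p "/" then 0 else 1) ≥ min_depth))
  let present := PySem.Set.ofList filtered
  (filtered.foldl (fun st path =>
      if PySem.Set.contains st.1 path then st
      else (PySem.Set.add st.1 path,
            if pvHLA present [] path.toList then st.2 else st.2 ++ [path]))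
    ((PySem.Set.empty : PySem.Set String), ([] : List String))).2

-- ===== PRECONDITION & SPEC =====
def Spec_remove_redundant_paths_py (items : List String) (min_depth : Int) (out : List String) : Prop := out = remove_redundant_paths_py_alt items min_depth
instance (items : List String) (min_depth : Int) (out : List String) : Decidable (Spec_remove_redundant_paths_py items min_depth out) := by unfold Spec_remove_redundant_paths_py; infer_instance

-- ===== CLAIM (what is proved, stated in full; the proofs are below) =====
def Claim_equal_remove_redundant_paths_py : Prop := ∀ (items : List String) (min_depth : Int), Dom_remove_redundant_paths_py items min_depth → Spec_remove_redundant_paths_py items min_depth (remove_redundant_paths_py items min_depth)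

-- ===== LEMMAS AND PROOFS =====

-- q is a strict (proper) path-ancestor of p
def pvAnc (q p : String) : Bool := PySem.Str.startswith p (q ++ "/")

-- q is an ancestor of p or equal to it (the break condition of A's inner loop)
def pvAncEq (q p : String) : Bool := PySem.Str.startswith p (q ++ "/") || p == q

-- p has no strict ancestor among L ("p is minimal")
def pvMinIn (L : List String) (p : String) : Bool := !(L.any (fun q => pvAnc q p))

-- the common characterisation of both results: first occurrences of the
-- minimal-in-L elements, in order
def pvFof (L : List String) : List String → List String → List String
  | _, [] => []
  | seen, p :: rest =>
    if pvMinIn L p && !(seen.contains p) then p :: pvFof L (seen ++ [p]) rest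
    else pvFof L (seen ++ [p]) rest

theorem pvAnc_iff (q p : String) : pvAnc q p = true ↔ (q.toList ++ ['/']) <+: p.toList := by
  simp [pvAnc, PySem.Chars.startswith_iff]

theorem pvAnc_irrefl (p : String) : pvAnc p p = false := by
  rw [← Bool.not_eq_true, pvAnc_iff]
  intro h
  have := h.length_le
  simp at this

theorem pvAnc_trans {q p e : String} (h1 : pvAnc q p = true) (h2 : pvAnc p e = true) :
    pvAnc q e = true := by
  rw [pvAnc_iff] at *
  exact h1.trans ((List.prefix_append _ _).trans h2)

theorem pvAncEq_anc_trans {q p e : String} (h1 : pvAncEq q p = true) (h2 : pvAnc p e = true) :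
    pvAnc q e = true := by
  unfold pvAncEq at h1
  rcases Bool.or_eq_true _ _ |>.mp h1 with h | h
  · exact pvAnc_trans (h : pvAnc q p = true) h2
  · rwa [show p = q from beq_iff_eq.mp h] at h2

theorem pvScanA_fst (c : String) (r : List String) (i : Int) :
    (pvScanA c r i).1 = !(r.any (fun e => pvAncEq e c)) := by
  induction r generalizing i with
  | nil => simp [pvScanA]
  | cons e rest ih =>
    simp only [pvScanA]
    split_ifs with h1 h2
    · have he : pvAncEq e c = true := h1
      simp [List.any_cons, he]
    · have he : pvAncEq e c = false := by
        rw [← Bool.not_eq_true]; exact h1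
      simp [List.any_cons, he, ih]
    · have he : pvAncEq e c = false := by
        rw [← Bool.not_eq_true]; exact h1
      simp [List.any_cons, he, ih]

theorem pvScanA_shift (c : String) (r : List String) (i : Int) :
    (pvScanA c r (i + 1)).2 = ((pvScanA c r i).2).map (· + 1) := by
  induction r generalizing i with
  | nil => simp [pvScanA]
  | cons e rest ih =>
    simp only [pvScanA]
    split_ifs with h1 h2 <;> simp [ih]

theorem pvScanA_nonneg (c : String) (r : List String) (i : Int)
    (hi : 0 ≤ i) : ∀ j ∈ (pvScanA c r i).2, 0 ≤ j := by
  induction r generalizing i with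
  | nil => simp [pvScanA]
  | cons e rest ih =>
    simp only [pvScanA]
    split_ifs with h1 h2
    · simp
    · simp only [List.mem_cons]
      rintro j (rfl | hj)
      · exact hi
      · exact ih (i + 1) (by omega) j hj
    · exact ih (i + 1) (by omega)

theorem pop_succ (x : String) (xs : List String) (i : Int) (hi : 0 ≤ i) :
    PySem.List.pop? (x :: xs) (i + 1) = (PySem.List.pop? xs i).map (fun q => (q.1, x :: q.2)) := by
  simp only [PySem.List.pop?, PySem.List.pyIdx?, List.length_cons]
  rw [if_pos (by omega : (0:Int) ≤ i + 1), if_pos hi]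
  push_cast
  by_cases h : i < (xs.length : Int)
  · rw [if_pos (by omega), if_pos h]
    have h2 : (i+1).toNat = i.toNat + 1 := by omega
    simp [h2, Option.map_map]
    rfl
  · rw [if_neg (by omega), if_neg h]
    rfl

theorem pvPopAll_cons (ys : List String) (j : Int) (rest : List Int) :
    pvPopAll ys (j :: rest) =
      pvPopAll (match PySem.List.pop? ys j with | some q => q.2 | none => ys) rest := rfl

theorem pvPopAll_append (xs : List String) (a b : List Int) :
    pvPopAll xs (a ++ b) = pvPopAll (pvPopAll xs a) b := by
  simp [pvPopAll, List.foldl_append]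

theorem pvPopAll_shift (x : String) (xs : List String) (idxs : List Int)
    (h : ∀ j ∈ idxs, 0 ≤ j) :
    pvPopAll (x :: xs) (idxs.map (· + 1)) = x :: pvPopAll xs idxs := by
  induction idxs generalizing xs with
  | nil => rfl
  | cons i tl ih =>
    have hi : 0 ≤ i := h i (List.mem_cons_self)
    have htl : ∀ j ∈ tl, 0 ≤ j := fun j hj => h j (List.mem_cons_of_mem _ hj)
    simp only [List.map_cons]
    rw [pvPopAll_cons, pvPopAll_cons, pop_succ x xs i hi]
    cases hp : PySem.List.pop? xs i with
    | none => simp only [Option.map_none]; exact ih _ htl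
    | some q => simp only [Option.map_some]; exact ih _ htl

theorem pvPopScan (c : String) (r : List String)
    (h : r.any (fun e => pvAncEq e c) = false) :
    pvPopAll r ((pvScanA c r 0).2).reverse = r.filter (fun e => !(pvAnc c e)) := by
  induction r with
  | nil => rfl
  | cons e rest ih =>
    have he : pvAncEq e c = false := by
      simp only [List.any_cons, Bool.or_eq_false_iff] at h; exact h.1
    have hrest : rest.any (fun e => pvAncEq e c) = false := by
      simp only [List.any_cons, Bool.or_eq_false_iff] at h; exact h.2
    have hnn : ∀ j ∈ ((pvScanA c rest 0).2).reverse, 0 ≤ j := by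
      intro j hj
      exact pvScanA_nonneg c rest 0 le_rfl j (List.mem_reverse.mp hj)
    have hne : (PySem.Str.startswith c (e ++ "/") || c == e) = false := he
    simp only [pvScanA, hne, Bool.false_eq_true, if_false]
    split_ifs with h2
    · have hae : pvAnc c e = true := h2
      rw [pvScanA_shift c rest 0]
      simp only [List.reverse_cons, ← List.map_reverse]
      rw [pvPopAll_append, pvPopAll_shift e rest _ hnn, ih hrest]
      simp [pvPopAll_cons, PySem.List.pop?_zero_cons, List.filter_cons, hae, pvPopAll]
    · have hae : pvAnc c e = false := by
        rw [← Bool.not_eq_true]; exact h2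
      rw [pvScanA_shift c rest 0, ← List.map_reverse, pvPopAll_shift e rest _ hnn, ih hrest]
      simp [List.filter_cons, hae]

theorem pvStepA_eq0 (r : List String) (c : String) :
    (if (pvScanA c r 0).1 then pvPopAll r ((pvScanA c r 0).2).reverse ++ [c] else r) =
      (if r.any (fun e => pvAncEq e c) then r
       else r.filter (fun e => !(pvAnc c e)) ++ [c]) := by
  rw [pvScanA_fst]
  cases hany : r.any (fun e => pvAncEq e c) with
  | false => simp [pvPopScan c r hany]
  | true => simp

theorem pvStepA_eq (r : List String) (c : String) :
    pvStepA r c =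
      if r.any (fun e => pvAncEq e c) then r
      else r.filter (fun e => !(pvAnc c e)) ++ [c] := pvStepA_eq0 r c

theorem pvFof_append (L : List String) (a : List String) :
    ∀ (seen b : List String),
      pvFof L seen (a ++ b) = pvFof L seen a ++ pvFof L (seen ++ a) b := by
  induction a with
  | nil => simp [pvFof]
  | cons p tl ih =>
    intro seen b
    simp only [List.cons_append, pvFof]
    split_ifs with hk
    · rw [ih, List.append_assoc]; simp
    · rw [ih]; simp

theorem pvMem_fof (L : List String) (rest : List String) :
    ∀ (seen : List String) (x : String),
      x ∈ pvFof L seen rest ↔ x ∈ rest ∧ pvMinIn L x = true ∧ x ∉ seen := by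
  induction rest with
  | nil => simp [pvFof]
  | cons p tl ih =>
    intro seen x
    simp only [pvFof]
    split_ifs with hk
    · rcases Bool.and_eq_true _ _ |>.mp hk with ⟨hmin, hns⟩
      by_cases hx : x = p
      · subst hx
        have hns' : x ∉ seen := by simpa using hns
        simp [ih, hmin, hns']
      · simp [List.mem_cons, hx, ih, List.mem_append]
    · by_cases hx : x = p
      · subst hx
        rw [ih]
        constructor
        · rintro ⟨_, _, hn⟩; exact absurd (List.mem_append.mpr (Or.inr (by simp))) hn
        · rintro ⟨_, hmin, hns⟩
          have hk' : ¬(pvMinIn L x = true ∧ (!seen.contains x) = true) := by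
            rwa [Bool.and_eq_true] at hk
          exact (hk' ⟨hmin, by simpa using hns⟩).elim
      · simp [List.mem_cons, hx, ih, List.mem_append]

theorem pvMinIn_append (u : List String) (p x : String) :
    pvMinIn (u ++ [p]) x = (pvMinIn u x && !(pvAnc p x)) := by
  simp [pvMinIn, List.any_append]

theorem pvFof_snoc_L (u : List String) (p : String) (rest : List String) :
    ∀ seen, pvFof (u ++ [p]) seen rest = (pvFof u seen rest).filter (fun e => !(pvAnc p e)) := by
  induction rest with
  | nil => intro seen; rfl
  | cons x tl ih =>
    intro seen
    simp only [pvFof, pvMinIn_append]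
    by_cases hm : pvMinIn u x = true
    all_goals by_cases ha : pvAnc p x = true
    all_goals by_cases hs : seen.contains x = true
    all_goals simp only [List.contains_eq_mem, decide_eq_true_eq] at hs
    all_goals simp [hm, ha, hs, ih, List.filter_cons]

theorem pvAny_anc (u : List String) (q : String) (hmin : ¬ pvMinIn u q = true) :
    ∃ r ∈ u, pvAnc r q = true := by
  cases hb : u.any (fun r => pvAnc r q) with
  | false => exact absurd (by simp only [pvMinIn, hb, Bool.not_false]) hmin
  | true => exact List.any_eq_true.mp hb

theorem pvMinAnc (u : List String) (p : String) :
    ∀ q, q ∈ u → pvAncEq q p = true →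
      ∃ q', q' ∈ u ∧ pvMinIn u q' = true ∧ pvAncEq q' p = true := by
  have H : ∀ (n : ℕ) (q : String), q.toList.length ≤ n → q ∈ u → pvAncEq q p = true →
      ∃ q', q' ∈ u ∧ pvMinIn u q' = true ∧ pvAncEq q' p = true := by
    intro n
    induction n with
    | zero =>
      intro q hlen hq hqe
      by_cases hmin : pvMinIn u q = true
      · exact ⟨q, hq, hmin, hqe⟩
      · obtain ⟨r, hr, har⟩ := pvAny_anc u q hmin
        have hl := ((pvAnc_iff r q).mp har).length_le
        rw [List.length_append] at hl
        simp only [List.length_cons, List.length_nil] at hl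
        omega
    | succ n ih =>
      intro q hlen hq hqe
      by_cases hmin : pvMinIn u q = true
      · exact ⟨q, hq, hmin, hqe⟩
      · obtain ⟨r, hr, har⟩ := pvAny_anc u q hmin
        have hl := ((pvAnc_iff r q).mp har).length_le
        rw [List.length_append] at hl
        simp only [List.length_cons, List.length_nil] at hl
        refine ih r (by omega) hr ?_
        unfold pvAncEq
        rw [Bool.or_eq_true]
        rcases Bool.or_eq_true _ _ |>.mp hqe with h | h
        · exact Or.inl (pvAnc_trans har h)
        · have hpq : p = q := beq_iff_eq.mp h
          exact Or.inl (by rwa [hpq])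
  intro q hq hqe
  exact H q.toList.length q le_rfl hq hqe

theorem pvAny_fof (u : List String) (p : String) :
    (pvFof u [] u).any (fun e => pvAncEq e p) = u.any (fun e => pvAncEq e p) := by
  cases hany : u.any (fun e => pvAncEq e p) with
  | true =>
    obtain ⟨q, hq, hqe⟩ := List.any_eq_true.mp hany
    obtain ⟨q', hq', hmin, hqe'⟩ := pvMinAnc u p q hq hqe
    exact List.any_eq_true.mpr ⟨q', (pvMem_fof u u [] q').mpr ⟨hq', hmin, by simp⟩, hqe'⟩
  | false =>
    rw [Bool.eq_false_iff]
    intro hf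
    obtain ⟨q, hq, hqe⟩ := List.any_eq_true.mp hf
    have := ((pvMem_fof u u [] q).mp hq).1
    rw [List.any_eq_false] at hany
    exact absurd hqe (by simpa using hany q this)

theorem pvFoldA (L : List String) : L.foldl pvStepA [] = pvFof L [] L := by
  induction L using List.reverseRecOn with
  | nil => rfl
  | append_singleton u p ih =>
    rw [List.foldl_append, List.foldl_cons, List.foldl_nil, ih, pvStepA_eq,
        pvFof_append, pvFof_snoc_L]
    have hsing : pvFof (u ++ [p]) ([] ++ u) [p] =
        if pvMinIn (u ++ [p]) p && !(u.contains p) then [p] else [] := by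
      simp only [pvFof, List.nil_append]
    rw [hsing, pvAny_fof u p]
    cases hany : u.any (fun e => pvAncEq e p) with
    | true =>
      obtain ⟨q, hq, hqe⟩ := List.any_eq_true.mp hany
      have hguard : (pvMinIn (u ++ [p]) p && !(u.contains p)) = false := by
        rcases Bool.or_eq_true _ _ |>.mp hqe with h | h
        · have : pvMinIn u p = false := by
            have ht : u.any (fun r => pvAnc r p) = true := List.any_eq_true.mpr ⟨q, hq, h⟩
            simp [pvMinIn, ht]
          rw [pvMinIn_append, this]
          simp
        · have hpu : p ∈ u := by rwa [show p = q from beq_iff_eq.mp h]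
          have : u.contains p = true := by simpa [List.contains_eq_mem] using hpu
          rw [this]
          simp
      have hfilt : (pvFof u [] u).filter (fun e => !(pvAnc p e)) = pvFof u [] u := by
        apply List.filter_eq_self.mpr
        intro e he
        rw [Bool.not_eq_eq_eq_not, Bool.not_true]
        by_contra hae
        have hae : pvAnc p e = true := by
          cases hx : pvAnc p e
          · exact absurd hx hae
          · rfl
        have hqe2 : pvAnc q e = true := pvAncEq_anc_trans hqe hae
        have hmine := ((pvMem_fof u u [] e).mp he).2.1
        simp only [pvMinIn, Bool.not_eq_true', Bool.not_eq_false] at hmine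
        have : u.any (fun r => pvAnc r e) = true := List.any_eq_true.mpr ⟨q, hq, hqe2⟩
        simp [pvMinIn, this] at hmine
      rw [hguard, hfilt]
      simp
    | false =>
      have hmin : pvMinIn u p = true := by
        simp only [pvMinIn, Bool.not_eq_true']
        rw [List.any_eq_false]
        intro q hq
        have h2 : (PySem.Str.startswith p (q ++ "/") || p == q) = false := by
          rw [← Bool.not_eq_true]; exact List.any_eq_false.mp hany q hq
        have h3 : pvAnc q p = false := (Bool.or_eq_false_iff.mp h2).1
        simp [h3]
      have hcont : u.contains p = false := by
        cases hc : u.contains p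
        · rfl
        · exfalso
          have hpu : p ∈ u := by simpa [List.contains_eq_mem] using hc
          have := List.any_eq_false.mp hany p hpu
          simp [pvAncEq] at this
      rw [pvMinIn_append, pvAnc_irrefl, hmin, hcont]
      simp

theorem pvHLA_iff (present : PySem.Set String) :
    ∀ (rest pre : List Char),
      pvHLA present pre rest = true ↔
        ∃ q ∈ present, pre <+: q.toList ∧ (q.toList ++ ['/']) <+: (pre ++ rest) := by
  intro rest
  induction rest with
  | nil =>
    intro pre
    simp only [pvHLA, List.append_nil]
    constructor
    · intro h; exact absurd h (by simp)
    · rintro ⟨q, hq, hp1, hp2⟩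
      have l1 := hp1.length_le
      have l2 := hp2.length_le
      rw [List.length_append] at l2
      simp only [List.length_cons, List.length_nil] at l2
      omega
  | cons c rest' ih =>
    intro pre
    simp only [pvHLA]
    split_ifs with hc
    · rcases Bool.and_eq_true _ _ |>.mp hc with ⟨hceq, hcon⟩
      have hc' : c = '/' := by simpa using hceq
      have hmem : String.ofList pre ∈ present := (PySem.Set.contains_iff _ _).mp hcon
      simp only [true_iff]
      refine ⟨String.ofList pre, hmem, ?_, ?_⟩
      · simp
      · simp [hc']
    · rw [ih]
      constructor
      · rintro ⟨q, hq, hp1, hp2⟩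
        refine ⟨q, hq, (List.prefix_append pre [c]).trans hp1, ?_⟩
        simpa [List.append_assoc] using hp2
      · rintro ⟨q, hq, hp1, hp2⟩
        by_cases hlen : q.toList.length = pre.length
        · exfalso
          have hqeq : q.toList = pre := (hp1.eq_of_length hlen.symm).symm
          have hpc : pre ++ ['/'] <+: pre ++ c :: rest' := hqeq ▸ hp2
          have hcslash : c = '/' := by
            have := (List.prefix_append_right_inj pre).mp hpc
            rcases this with ⟨t, ht⟩
            cases ht
            rfl
          have hcon2 : PySem.Set.contains present (String.ofList pre) = true := by
            rw [← hqeq]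
            simp only [String.ofList_toList]
            exact (PySem.Set.contains_iff _ _).mpr hq
          exact hc (by
            rw [hcslash]
            simp only [beq_self_eq_true, Bool.true_and]
            exact hcon2)
        · have hlt : pre.length < q.toList.length := by
            have := hp1.length_le
            omega
          refine ⟨q, hq, ?_, by simpa [List.append_assoc] using hp2⟩
          have hq2 : q.toList <+: pre ++ c :: rest' := (List.prefix_append _ _).trans hp2
          have hpc : pre ++ [c] <+: pre ++ c :: rest' := by simp
          refine List.prefix_of_prefix_length_le hpc hq2 ?_
          rw [List.length_append]
          simp only [List.length_cons, List.length_nil]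
          omega

theorem pvHLA_eq_minIn (L : List String) (p : String) :
    pvHLA (PySem.Set.ofList L) [] p.toList = !(pvMinIn L p) := by
  have h1 : pvHLA (PySem.Set.ofList L) [] p.toList = true ↔ ∃ q ∈ L, pvAnc q p = true := by
    rw [pvHLA_iff]
    constructor
    · rintro ⟨q, hq, _, hp2⟩
      exact ⟨q, (PySem.Set.mem_ofList _ _).mp hq, (pvAnc_iff q p).mpr (by simpa using hp2)⟩
    · rintro ⟨q, hq, ha⟩
      exact ⟨q, (PySem.Set.mem_ofList _ _).mpr hq, List.nil_prefix,
        by simpa using (pvAnc_iff q p).mp ha⟩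
  have h2 : (!(pvMinIn L p)) = true ↔ ∃ q ∈ L, pvAnc q p = true := by
    simp [pvMinIn]
  rw [Bool.eq_iff_iff, h1, h2]

theorem pvFoldB (L : List String) :
    ∀ (rest : List String) (s : PySem.Set String) (seen acc : List String),
      (∀ x, PySem.Set.contains s x = true ↔ x ∈ seen) →
      (rest.foldl (fun st path =>
          if PySem.Set.contains st.1 path then st
          else (PySem.Set.add st.1 path,
                if pvHLA (PySem.Set.ofList L) [] path.toList then st.2 else st.2 ++ [path]))
        (s, acc)).2 = acc ++ pvFof L seen rest := by
  intro rest
  induction rest with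
  | nil => intro s seen acc hinv; simp [pvFof]
  | cons p tl ih =>
    intro s seen acc hinv
    rw [List.foldl_cons]
    have hinv' : ∀ x, PySem.Set.contains (PySem.Set.add s p) x = true ↔ x ∈ seen ++ [p] := by
      intro x
      rw [PySem.Set.contains_iff, PySem.Set.mem_add]
      have hx := hinv x
      rw [PySem.Set.contains_iff] at hx
      simp only [List.mem_append, List.mem_singleton, hx]
    by_cases hc : PySem.Set.contains s p = true
    · have hps : p ∈ seen := (hinv p).mp hc
      have hcs : seen.contains p = true := by simpa [List.contains_eq_mem] using hps
      simp only [hc, if_true, pvFof, hcs, Bool.not_true, Bool.and_false,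
        Bool.false_eq_true, if_false]
      have hinv2 : ∀ x, PySem.Set.contains s x = true ↔ x ∈ seen ++ [p] := by
        intro x
        rw [hinv x]
        simp only [List.mem_append, List.mem_singleton]
        constructor
        · exact Or.inl
        · rintro (h | rfl)
          · exact h
          · exact hps
      exact ih s (seen ++ [p]) acc hinv2
    · have hps : p ∉ seen := fun h => hc ((hinv p).mpr h)
      have hcs : seen.contains p = false := by
        cases hx : seen.contains p
        · rfl
        · exact absurd (by simpa [List.contains_eq_mem] using hx) hps
      rw [if_neg hc, pvHLA_eq_minIn]
      simp only [pvFof, hcs, Bool.not_false, Bool.and_true]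
      cases hm : pvMinIn L p with
      | true =>
        simp only [Bool.not_true, Bool.false_eq_true, if_false, if_true]
        rw [ih (PySem.Set.add s p) (seen ++ [p]) (acc ++ [p]) hinv']
        simp
      | false =>
        simp only [Bool.not_false, if_true, Bool.false_eq_true, if_false]
        exact ih (PySem.Set.add s p) (seen ++ [p]) acc hinv'

theorem pvFiltered_eq (items : List String) (min_depth : Int) :
    items.foldl (fun acc path => if pvDepthA path ≥ min_depth then acc ++ [path] else acc) [] =
      items.filter (fun p =>
        decide ((PySem.Str.count p "/" : Int) + (if PySem.Str.startswith p "/" then 0 else 1) ≥ min_depth)) := by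
  rw [PySem.List.foldl_append_ite_eq_filter]
  simp only [List.nil_append]
  apply List.filter_congr
  intro p _
  rcases hx : PySem.Str.startswith p "/" with _ | _ <;>
    simp only [pvDepthA, hx, if_true, if_false, Bool.false_eq_true, decide_eq_decide] <;>
    omega

theorem pv_main (items : List String) (min_depth : Int) :
    remove_redundant_paths_py items min_depth = remove_redundant_paths_py_alt items min_depth := by
  unfold remove_redundant_paths_py remove_redundant_paths_py_alt
  have hB : ∀ (L : List String),
      (L.foldl (fun st path =>
        if PySem.Set.contains st.1 path then st
        else (PySem.Set.add st.1 path,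
              if pvHLA (PySem.Set.ofList L) [] path.toList then st.2 else st.2 ++ [path]))
        ((PySem.Set.empty : PySem.Set String), ([] : List String))).2 = pvFof L [] L := by
    intro L
    rw [pvFoldB L L PySem.Set.empty [] [] (by intro x; simp [PySem.Set.contains_iff, PySem.Set.empty])]
    simp
  by_cases hnil : items = []
  · subst hnil; simp
  · rw [if_neg (by simpa using hnil)]
    rw [pvFiltered_eq]
    set F := items.filter (fun p =>
      decide ((PySem.Str.count p "/" : Int) + (if PySem.Str.startswith p "/" then 0 else 1) ≥ min_depth)) with hF
    by_cases hfe : F = []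
    · rw [if_pos (by simpa using hfe), hfe]
      simp [hB]
    · rw [if_neg (by simpa using hfe), pvFoldA, hB]


-- ===== VERDICT (by name: the statement is the Claim_ definition above) =====
theorem remove_redundant_paths_py_spec : Claim_equal_remove_redundant_paths_py := by
  intro items min_depth _hdom
  unfold Spec_remove_redundant_paths_py
  exact pv_main items min_depth
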